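-- pv_equiv track=rewrite | github.com/huangjihui511/seq2seq-code-prediction | javalangTest3.py | split2pair
-- ===== SOURCE A (Python) =====
-- def split2pair(l):
--     result = []
--     for i in range(1,len(l)):
--         input = []
--         for j in range(i):
--             input += l[j]
--         output = l[i]
--         result.append((input,output))
--     return result
-- ===== SOURCE B (Python) =====
-- def split2pair(l):
--     result = []
--     prefix = []
--     for i in range(1, len(l)):
--         prefix += l[i - 1]
--         result.append((list(prefix), l[i]))
--     return result
-- ===== Notes on version B (the rewrite author's own statement) =====
-- stated objective: alternative
-- what changed: Replaces the inner loop that rebuilds the prefix concatenation from scratch for every i with a single running prefix accumulator extended once per step and copied when appended; total cost stays dominated by the quadratic output size, so no speedup is claimed.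
import Mathlib
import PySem

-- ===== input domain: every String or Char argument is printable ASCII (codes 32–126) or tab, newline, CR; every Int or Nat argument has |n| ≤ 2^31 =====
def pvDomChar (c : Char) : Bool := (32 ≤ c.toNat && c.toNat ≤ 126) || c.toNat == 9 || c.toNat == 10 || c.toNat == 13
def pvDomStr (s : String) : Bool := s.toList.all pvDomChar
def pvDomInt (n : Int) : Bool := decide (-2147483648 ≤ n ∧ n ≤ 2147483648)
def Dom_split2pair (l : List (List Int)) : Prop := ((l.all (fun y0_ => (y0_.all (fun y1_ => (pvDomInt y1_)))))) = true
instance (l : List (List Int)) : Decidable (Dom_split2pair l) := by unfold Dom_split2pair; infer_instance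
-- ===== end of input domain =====

-- B replaces A's inner prefix-reconcatenation loop with a single running prefix accumulator (a different one-pass decomposition; the quadratic output size dominates either way).


-- ===== PORT A =====
-- for i in range(1,len(l)): input = []; for j in range(i): input += l[j]; result.append((input, l[i]))
def split2pair (l : List (List Int)) : List (List Int × List Int) :=
  (PySem.List.pyRange 1 (l.length : Int) 1).foldl
    (fun result i =>
      result ++ [((PySem.List.pyRange 0 i 1).foldl
                    (fun input j => input ++ PySem.List.pyGetD l j []) [],
                  PySem.List.pyGetD l i [])])
    []

-- ===== PORT B =====
-- prefix = []; for i in range(1,len(l)): prefix += l[i-1]; result.append((list(prefix), l[i]))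
def split2pair_alt (l : List (List Int)) : List (List Int × List Int) :=
  ((PySem.List.pyRange 1 (l.length : Int) 1).foldl
    (fun st i =>
      let pre := st.1 ++ PySem.List.pyGetD l (i - 1) []
      (pre, st.2 ++ [(pre, PySem.List.pyGetD l i [])]))
    (([] : List Int), ([] : List (List Int × List Int)))).2

-- ===== PRECONDITION & SPEC =====
def Spec_split2pair (l : List (List Int)) (out : List (List Int × List Int)) : Prop := out = split2pair_alt l
instance (l : List (List Int)) (out : List (List Int × List Int)) : Decidable (Spec_split2pair l out) := by unfold Spec_split2pair; infer_instance

-- ===== CLAIM (what is proved, stated in full; the proofs are below) =====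
def Claim_equal_split2pair : Prop := ∀ (l : List (List Int)), Dom_split2pair l → Spec_split2pair l (split2pair l)

-- ===== LEMMAS AND PROOFS =====

-- common closed form: pairs ((l[0..i)).flatten, l[i]) for i in [1, k)
def pvTgt (l : List (List Int)) (k : Nat) : List (List Int × List Int) :=
  (PySem.List.pyRange 1 (k : Int) 1).map
    (fun i => ((l.take i.toNat).flatten, PySem.List.pyGetD l i []))

lemma take_succ_flatten (l : List (List Int)) (k : Nat) :
    (l.take (k + 1)).flatten = (l.take k).flatten ++ PySem.List.pyGetD l (k : Int) [] := by
  rw [List.take_add_one, List.flatten_append, PySem.List.pyGetD_natCast]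
  by_cases h : k < l.length
  · simp [List.getD, h]
  · simp [List.getD, List.getElem?_eq_none (by omega : l.length ≤ k)]

lemma inner_loop_eq (l : List (List Int)) (k : Nat) :
    (PySem.List.pyRange 0 (k : Int) 1).foldl
      (fun input j => input ++ PySem.List.pyGetD l j []) [] = (l.take k).flatten := by
  induction k with
  | zero => simp [PySem.List.pyRange_one_eq_nil]
  | succ k ih =>
    rw [show ((k + 1 : Nat) : Int) = (k : Int) + 1 by push_cast; ring,
      PySem.List.pyRange_one_succ_right (by positivity), List.foldl_append, ih,
      take_succ_flatten]
    simp

lemma a_eq_tgt (l : List (List Int)) : split2pair l = pvTgt l l.length := by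
  unfold split2pair pvTgt
  rw [PySem.List.foldl_append_singleton_eq_map]
  simp only [List.nil_append]
  refine List.map_congr_left (fun i hi => ?_)
  rw [PySem.List.mem_pyRange_one] at hi
  have hnat : ((i.toNat : Nat) : Int) = i := Int.toNat_of_nonneg (by omega)
  rw [← hnat, inner_loop_eq, Int.toNat_natCast]

lemma b_loop_eq (l : List (List Int)) (k : Nat) :
    (PySem.List.pyRange 1 (k : Int) 1).foldl
      (fun st i =>
        let pre := st.1 ++ PySem.List.pyGetD l (i - 1) []
        (pre, st.2 ++ [(pre, PySem.List.pyGetD l i [])]))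
      (([] : List Int), ([] : List (List Int × List Int)))
    = ((l.take (k - 1)).flatten, pvTgt l k) := by
  induction k with
  | zero => simp [PySem.List.pyRange_one_eq_nil, pvTgt]
  | succ k ih =>
    rcases Nat.eq_zero_or_pos k with hk | hk
    · subst hk
      simp [PySem.List.pyRange_one_eq_nil, pvTgt]
    · rw [show ((k + 1 : Nat) : Int) = (k : Int) + 1 by push_cast; ring,
        PySem.List.pyRange_one_succ_right (by exact_mod_cast hk), List.foldl_append, ih]
      simp only [List.foldl_cons, List.foldl_nil]
      have h1 : ((k : Int) - 1) = ((k - 1 : Nat) : Int) := by omega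
      have h2 : (k - 1) + 1 = k := by omega
      have hfst : (List.take (k - 1) l).flatten ++ PySem.List.pyGetD l ((k : Int) - 1) []
          = (List.take k l).flatten := by
        rw [h1, ← take_succ_flatten, h2]
      have hsnd : pvTgt l (k + 1)
          = pvTgt l k ++ [((List.take k l).flatten, PySem.List.pyGetD l (k : Int) [])] := by
        unfold pvTgt
        rw [show ((k + 1 : Nat) : Int) = (k : Int) + 1 by push_cast; ring,
          PySem.List.pyRange_one_succ_right (by exact_mod_cast hk), List.map_append]
        simp
      rw [hfst, hsnd]
      simp

lemma b_eq_tgt (l : List (List Int)) : split2pair_alt l = pvTgt l l.length := by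
  unfold split2pair_alt
  rw [b_loop_eq]

-- ===== VERDICT (by name: the statement is the Claim_ definition above) =====
theorem split2pair_spec : Claim_equal_split2pair := by
  intro l _
  unfold Spec_split2pair
  rw [a_eq_tgt, b_eq_tgt]
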